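-- pv_equiv track=rewrite | github.com/DongwooHan-GitHub/SESAC---Python | Docs/lv_2.py | pyramid3
-- ===== SOURCE A (Python) =====
-- def pyramid3(n):
--     res = []
--     for i in range(n):
--         res.append(' ' * (n - 1 - i))
--         for j in range(i + 1):
--             if j == 0:
--                 res.append('A ')
--             elif j == 1:
--                 res.append('B ')
--             elif j == 2:
--                 res.append('C ')
--             elif j == 3:
--                 res.append('D ')
--             elif j == 4:
--                 res.append('E ')
--         res.append('\n')
--     return ''.join(res)
-- ===== SOURCE B (Python) =====
-- def pyramid3(n):
--     letters = ''
--     rows = []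
--     for i in range(n):
--         if i < 5:
--             letters += 'ABCDE'[i] + ' '
--         rows.append(' ' * (n - 1 - i) + letters + '\n')
--     return ''.join(rows)
-- ===== Notes on version B (the rewrite author's own statement) =====
-- stated objective: alternative
-- what changed: Replaces the nested loop that rebuilds each row's letter prefix piece by piece with a single pass maintaining a running 'letters' string (grown by one letter per row, capped at 5) and appending one whole row string per iteration.
import Mathlib
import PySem

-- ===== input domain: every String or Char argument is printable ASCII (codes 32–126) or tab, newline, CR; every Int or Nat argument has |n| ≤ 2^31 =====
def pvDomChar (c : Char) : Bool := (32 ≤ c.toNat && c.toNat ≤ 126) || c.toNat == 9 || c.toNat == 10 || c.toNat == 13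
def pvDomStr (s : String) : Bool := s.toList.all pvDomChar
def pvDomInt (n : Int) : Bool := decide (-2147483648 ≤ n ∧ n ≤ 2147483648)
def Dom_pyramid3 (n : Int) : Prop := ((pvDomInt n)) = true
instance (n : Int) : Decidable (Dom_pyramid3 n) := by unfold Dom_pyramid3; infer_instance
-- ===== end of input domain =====

-- B replaces A's nested per-row letter loop with a single pass keeping a running 'letters' accumulator; same return value.

-- ===== PORT A =====
-- ' ' * k  (Python: empty string for k ≤ 0) — ported by hand via List.replicate; exact, since .toNat clamps negatives to 0 exactly like Python's empty repetition
def pyStrMul (c : Char) (k : Int) : String := String.ofList (List.replicate k.toNat c)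

def pyramid3 (n : Int) : String :=
  let res : List String :=
    (PySem.List.pyRange 0 n 1).foldl (fun res i =>
      let res := res ++ [pyStrMul ' ' (n - 1 - i)]
      let res := (PySem.List.pyRange 0 (i + 1) 1).foldl (fun res j =>
        if j == 0 then res ++ ["A "]
        else if j == 1 then res ++ ["B "]
        else if j == 2 then res ++ ["C "]
        else if j == 3 then res ++ ["D "]
        else if j == 4 then res ++ ["E "]
        else res) res
      res ++ ["\n"]) []
  PySem.Str.join "" res

-- ===== PORT B =====
def pyramid3_alt (n : Int) : String :=
  let st : String × List String :=
    (PySem.List.pyRange 0 n 1).foldl (fun st i =>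
      let letters := if i < 5 then st.1 ++ String.ofList ((PySem.Str.pyGet? "ABCDE" i).toList) ++ " " else st.1
      (letters, st.2 ++ [pyStrMul ' ' (n - 1 - i) ++ letters ++ "\n"])) ("", [])
  PySem.Str.join "" st.2

-- ===== PRECONDITION & SPEC =====
def Spec_pyramid3 (n : Int) (out : String) : Prop := out = pyramid3_alt n
instance (n : Int) (out : String) : Decidable (Spec_pyramid3 n out) := by unfold Spec_pyramid3; infer_instance

-- ===== CLAIM (what is proved, stated in full; the proofs are below) =====
def Claim_equal_pyramid3 : Prop := ∀ (n : Int), Dom_pyramid3 n → Spec_pyramid3 n (pyramid3 n)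

-- ===== LEMMAS AND PROOFS =====

-- concatenation of a list of strings, at the List Char level
def flatS (xs : List String) : List Char := (xs.map String.toList).flatten

theorem flatS_append (xs ys : List String) : flatS (xs ++ ys) = flatS xs ++ flatS ys := by
  simp [flatS]

theorem flatten_intersperse_nil {α : Type} (l : List (List α)) :
    (List.intersperse ([] : List α) l).flatten = l.flatten := by
  induction l with
  | nil => rfl
  | cons a t ih =>
    cases t with
    | nil => rfl
    | cons b u => simp [List.intersperse] at *; simpa using ih

theorem join_empty_eq (xs : List String) : PySem.Str.join "" xs = String.ofList (flatS xs) := by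
  simp [PySem.Str.join, PySem.Chars.join, flatS, List.intercalate, flatten_intersperse_nil]

-- what A's inner loop appends for column index j
def rowChunk (j : Int) : List String :=
  if j == 0 then ["A "]
  else if j == 1 then ["B "]
  else if j == 2 then ["C "]
  else if j == 3 then ["D "]
  else if j == 4 then ["E "]
  else []

-- B's running 'letters' after k rows, as a char list
def lettersF : Nat → List Char
  | 0 => []
  | k + 1 => lettersF k ++ flatS (rowChunk (k : Int))

theorem innerStep_eq (res : List String) (j : Int) :
    (if j == 0 then res ++ ["A "]
     else if j == 1 then res ++ ["B "]
     else if j == 2 then res ++ ["C "]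
     else if j == 3 then res ++ ["D "]
     else if j == 4 then res ++ ["E "]
     else res) = res ++ rowChunk j := by
  simp only [rowChunk]
  split_ifs <;> simp

theorem inner_loop_eq (k : Nat) (res : List String) :
    flatS ((PySem.List.pyRange 0 (k : Int) 1).foldl (fun res j =>
        if j == 0 then res ++ ["A "]
        else if j == 1 then res ++ ["B "]
        else if j == 2 then res ++ ["C "]
        else if j == 3 then res ++ ["D "]
        else if j == 4 then res ++ ["E "]
        else res) res)
      = flatS res ++ lettersF k := by
  induction k generalizing res with
  | zero =>
    rw [show ((0 : Nat) : Int) = 0 by rfl, PySem.List.pyRange_one_eq_nil (le_refl 0)]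
    simp [lettersF]
  | succ k ih =>
    rw [show ((k + 1 : Nat) : Int) = (k : Int) + 1 by push_cast; ring,
        PySem.List.pyRange_one_succ_right (by positivity), List.foldl_append]
    simp only [List.foldl]
    rw [innerStep_eq, flatS_append, ih, lettersF, List.append_assoc]

theorem letters_update_eq (k : Nat) :
    (if (k : Int) < 5 then String.toList (String.ofList ((PySem.Str.pyGet? "ABCDE" (k : Int)).toList) ++ " ") else []) = flatS (rowChunk (k : Int)) := by
  by_cases hk : k < 5
  · interval_cases k <;> decide
  · rw [if_neg (by exact_mod_cast by omega)]
    simp only [rowChunk, beq_iff_eq]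
    split_ifs with h1 h2 h3 h4 h5 <;> first | (exfalso; omega) | simp [flatS]

def stepA (n : Int) (res : List String) (i : Int) : List String :=
  let res := res ++ [pyStrMul ' ' (n - 1 - i)]
  let res := (PySem.List.pyRange 0 (i + 1) 1).foldl (fun res j =>
    if j == 0 then res ++ ["A "]
    else if j == 1 then res ++ ["B "]
    else if j == 2 then res ++ ["C "]
    else if j == 3 then res ++ ["D "]
    else if j == 4 then res ++ ["E "]
    else res) res
  res ++ ["\n"]

def stepB (n : Int) (st : String × List String) (i : Int) : String × List String :=
  let letters := if i < 5 then st.1 ++ String.ofList ((PySem.Str.pyGet? "ABCDE" i).toList) ++ " " else st.1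
  (letters, st.2 ++ [pyStrMul ' ' (n - 1 - i) ++ letters ++ "\n"])

theorem rowChunk_ge5 (j : Int) (h : 5 <= j) : rowChunk j = [] := by
  simp only [rowChunk, beq_iff_eq]
  split_ifs <;> first | (exfalso; omega) | rfl

theorem main_loop (n : Int) (m : Nat) :
    ((((List.range m).map (fun (k : Nat) => (k : Int))).foldl (stepB n) (("", []) : String × List String)).1.toList
        = lettersF m)
  ∧ flatS ((((List.range m).map (fun (k : Nat) => (k : Int))).foldl (stepB n) (("", []) : String × List String)).2)
        = flatS (((List.range m).map (fun (k : Nat) => (k : Int))).foldl (stepA n) []) := by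
  induction m with
  | zero => simp [lettersF, flatS]
  | succ m ih =>
    obtain ⟨ih1, ih2⟩ := ih
    rw [List.range_succ, List.map_append, List.foldl_append, List.foldl_append]
    simp only [List.map_cons, List.map_nil, List.foldl]
    have hlet :
        ((stepB n (((List.range m).map (fun (k : Nat) => (k : Int))).foldl (stepB n) (("", []) : String × List String)) (m : Int)).1).toList
          = lettersF (m + 1) := by
      simp only [stepB]
      split_ifs with h
      · rw [lettersF, ← letters_update_eq m, if_pos h]
        simp [ih1]
      · rw [lettersF, rowChunk_ge5 _ (by omega)]
        simp [ih1, flatS]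
    constructor
    · exact hlet
    · simp only [stepB, stepA] at hlet ⊢
      rw [show ((m : Int) + 1) = ((m + 1 : Nat) : Int) by push_cast; ring,
          flatS_append, flatS_append, inner_loop_eq, flatS_append, ih2]
      simp only [String.toList_append, flatS, List.map_cons, List.map_nil, List.flatten_cons,
        List.flatten_nil]
      rw [hlet]
      simp [List.append_assoc]

-- ===== VERDICT (by name: the statement is the Claim_ definition above) =====
theorem pyramid3_spec : Claim_equal_pyramid3 := by
  intro n _
  unfold Spec_pyramid3 pyramid3 pyramid3_alt
  rw [PySem.List.pyRange_one]
  simp only [sub_zero, zero_add]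
  rw [join_empty_eq, join_empty_eq]
  exact congrArg String.ofList (main_loop n n.toNat).2.symm
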